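-- pv_equiv track=rewrite | github.com/JBEI/jqmm | code/core/core.py | convert2PS
-- ===== SOURCE A (Python) =====
-- from builtins import str
--
-- def convert2PS(metNames):
--     """
--     Converts a list of metabolite names to a list of nonrepeated names with pseudo metabolites, e.g.:
--     ['accoa','accoa','fum']  --> ['accoa','accoa__ps1','fum']
--     """
--     pseudoEnd ='__ps'
--     metNamesPS=[]
--     metTimes = {}
--     for met in metNames:
--         if metNames.count(met)>1:
--             if met not in metTimes:
--                 metTimes[met] =  0
--             else:
--                 metTimes[met] += 1
--             post   = '' if metTimes[met] == 0 else pseudoEnd+str(metTimes[met])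
--             newMet = met+post
--         else:
--             newMet = met
--
--         metNamesPS.append(newMet)
--
--     return metNamesPS
-- ===== SOURCE B (Python) =====
-- def convert2PS(metNames):
--     """
--     Converts a list of metabolite names to a list of nonrepeated names with pseudo metabolites, e.g.:
--     ['accoa','accoa','fum']  --> ['accoa','accoa__ps1','fum']
--     """
--     positions = {}
--     for i, m in enumerate(metNames):
--         positions[m] = positions.get(m, []) + [i]
--     out = [''] * len(metNames)
--     for m, idxs in positions.items():
--         out[idxs[0]] = m
--         for k, i in enumerate(idxs[1:], 1):
--             out[i] = m + '__ps' + str(k)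
--     return out
-- ===== Notes on version B (the rewrite author's own statement) =====
-- stated objective: faster
-- what changed: B groups: one pass builds a name -> list-of-indices dict, then fills a preallocated result per group (plain at the first index, name+'__ps'+k at the k-th repeat), instead of A's per-element full-list count() scan with a running repeat counter.
import Mathlib
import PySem

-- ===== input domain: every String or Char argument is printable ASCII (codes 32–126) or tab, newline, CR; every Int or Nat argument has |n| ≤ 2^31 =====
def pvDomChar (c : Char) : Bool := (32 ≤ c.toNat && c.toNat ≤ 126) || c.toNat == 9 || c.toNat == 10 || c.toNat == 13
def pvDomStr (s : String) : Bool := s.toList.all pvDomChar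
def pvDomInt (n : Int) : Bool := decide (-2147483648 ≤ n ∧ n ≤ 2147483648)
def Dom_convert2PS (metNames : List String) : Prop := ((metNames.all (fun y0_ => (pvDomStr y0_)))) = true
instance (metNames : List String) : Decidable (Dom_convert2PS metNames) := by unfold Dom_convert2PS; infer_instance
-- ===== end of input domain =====

-- B replaces A's per-element full-list count() scan by a grouping pass (name -> index list)
-- and a per-group fill of a preallocated result; same return value, proved equal.
-- ===== PORT A =====
-- loop body of A (metTimes dict + append); `all` is the full metNames list used by count()
def convert2PS_stepA (all : List String) (st : PySem.Dict String Int × List String)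
    (met : String) : PySem.Dict String Int × List String :=
  if 1 < PySem.List.count all met then
    -- 'if met not in metTimes: metTimes[met] = 0 else: metTimes[met] += 1'
    let mt := if st.1.contains met = false then st.1.insert met 0 else st.1.modify met 0 (· + 1)
    let t := mt.getD met 0           -- metTimes[met]; met is present after either branch
    let post := if t = 0 then "" else "__ps" ++ PySem.Int.toStr t
    (mt, st.2 ++ [met ++ post])
  else
    (st.1, st.2 ++ [met])

def convert2PS (metNames : List String) : List String :=
  (metNames.foldl (convert2PS_stepA metNames) (PySem.Dict.empty, [])).2

-- ===== PORT B =====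
-- B fills a group: out[idxs[0]] = m; for k, i in enumerate(idxs[1:], 1): out[i] = m+'__ps'+str(k).
-- Groups coming from the positions dict are never empty; the [] case is the total-match filler.
-- Indices produced by enumerate are nonnegative, so `.toNat` with List.set is exact here.
def convert2PS_fill (out : List String) (m : String) (idxs : List Int) : List String :=
  match idxs with
  | [] => out
  | i0 :: rest =>
      (PySem.List.enumerate rest 1).foldl
        (fun o q => o.set q.2.toNat (m ++ "__ps" ++ PySem.Int.toStr q.1)) (out.set i0.toNat m)

def convert2PS_alt (metNames : List String) : List String :=
  -- pass 1: positions[m] = positions.get(m, []) + [i]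
  let positions := (PySem.List.enumerate metNames).foldl
      (fun d p => d.modify p.2 [] (fun l => l ++ [p.1]))
      (PySem.Dict.empty : PySem.Dict String (List Int))
  -- pass 2: fill out = [''] * len(metNames) group by group
  positions.items.foldl (fun out p => convert2PS_fill out p.1 p.2)
    (List.replicate metNames.length "")

-- ===== PRECONDITION & SPEC =====
def Spec_convert2PS (metNames : List String) (out : List String) : Prop := out = convert2PS_alt metNames
instance (metNames : List String) (out : List String) : Decidable (Spec_convert2PS metNames out) := by unfold Spec_convert2PS; infer_instance

-- ===== CLAIM (what is proved, stated in full; the proofs are below) =====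
def Claim_equal_convert2PS : Prop := ∀ (metNames : List String), Dom_convert2PS metNames → Spec_convert2PS metNames (convert2PS metNames)

-- ===== LEMMAS AND PROOFS =====

-- The common specification both programs are proved equal to: position j carries its name,
-- suffixed by '__ps' + (number of earlier occurrences of that name) when that number is nonzero.
def specAt (xs : List String) (j : Nat) : String :=
  let m := xs.getD j ""
  let c := ((xs.take j).count m : Int)
  if c = 0 then m else m ++ "__ps" ++ PySem.Int.toStr c

def specFill (xs : List String) : List String := (List.range xs.length).map (specAt xs)

theorem convert2PS_loopA (all : List String) :
    ∀ (rest pre : List String) (tA : PySem.Dict String Int) (acc : List String),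
    all = pre ++ rest →
    (∀ m, tA.contains m = decide (1 < all.count m ∧ 0 < pre.count m)) →
    (∀ m, 1 < all.count m → 0 < pre.count m → tA.getD m 0 = (pre.count m : Int) - 1) →
    (rest.foldl (convert2PS_stepA all) (tA, acc)).2
      = acc ++ (List.range' pre.length rest.length).map (specAt all) := by
  intro rest
  induction rest with
  | nil => intro pre tA acc _ _ _; simp
  | cons m rest ih =>
    intro pre tA acc hall hcon hget
    have hall' : all = (pre ++ [m]) ++ rest := by rw [hall]; simp
    have hmem : m ∈ all := by rw [hall]; simp
    have hpos : 0 < all.count m := List.count_pos_iff.mpr hmem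
    have hcnt' : ∀ m', (pre ++ [m]).count m' = pre.count m' + if m = m' then 1 else 0 := by
      intro m'; simp [List.count_append, List.count_singleton]
    have hgetD : all[pre.length]? = some m := by
      rw [hall, List.getElem?_append_right (Nat.le_refl pre.length)]
      simp
    have htake : all.take pre.length = pre := by
      rw [hall]; exact List.take_left
    have hspec : specAt all pre.length
        = if pre.count m = 0 then m else m ++ "__ps" ++ PySem.Int.toStr (pre.count m) := by
      simp [specAt, htake, hgetD]
    have hlen : (pre ++ [m]).length = pre.length + 1 := by simp
    have hrange : (List.range' pre.length (rest.length + 1)).map (specAt all)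
        = specAt all pre.length :: (List.range' (pre.length + 1) rest.length).map (specAt all) := by
      rw [List.range'_succ]; simp
    simp only [List.length_cons, List.foldl_cons, hrange]
    by_cases hrep : 1 < all.count m
    · by_cases hpre : 0 < pre.count m
      · -- repeated name, seen before: A modifies, suffix __ps(pre.count m)
        have hconm : tA.contains m = true := by rw [hcon]; simp [hrep, hpre]
        have hA : convert2PS_stepA all (tA, acc) m
            = (tA.modify m 0 (· + 1),
               acc ++ [m ++ ("__ps" ++ PySem.Int.toStr (pre.count m : Int))]) := by
          have h0 : tA.getD m 0 = (pre.count m : Int) - 1 := hget m hrep hpre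
          have h2 : (pre.count m : Int) - 1 + 1 = (pre.count m : Int) := by omega
          simp [convert2PS_stepA, hrep, hconm, PySem.Dict.getD_modify_self, h0, h2]
          omega
        rw [hA, ih (pre ++ [m]) _ _ hall' ?_ ?_]
        · rw [hspec, if_neg (by omega), hlen]
          simp [String.append_assoc]
        · intro m'
          rw [PySem.Dict.contains_modify, hcon m', hcnt' m']
          by_cases h : m' = m
          · subst h; simp [hrep]
          · simp [h, Ne.symm h]
        · intro m' h1 h2
          rw [hcnt'] at h2 ⊢
          rw [PySem.Dict.getD_modify]
          by_cases h : m' = m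
          · subst h; rw [hget _ h1 hpre]; simp
          · rw [if_neg h]
            simp only [Ne.symm h, if_false, Nat.add_zero] at h2 ⊢
            exact hget m' h1 h2
      · -- first occurrence of a repeated name: A inserts 0, plain
        have hconm : tA.contains m = false := by rw [hcon]; simp [hpre]
        have hA : convert2PS_stepA all (tA, acc) m = (tA.insert m 0, acc ++ [m]) := by
          simp [convert2PS_stepA, hrep, hconm, PySem.Dict.getD_insert_self]
        rw [hA, ih (pre ++ [m]) _ _ hall' ?_ ?_]
        · rw [hspec, if_pos (by omega), hlen]
          simp
        · intro m'
          rw [PySem.Dict.contains_insert, hcon m', hcnt' m']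
          by_cases h : m' = m
          · subst h; simp [hrep]
          · simp [h, Ne.symm h]
        · intro m' h1 h2
          rw [hcnt'] at h2 ⊢
          rw [PySem.Dict.getD_insert]
          by_cases h : m' = m
          · subst h; simp; omega
          · rw [if_neg h]
            simp only [Ne.symm h, if_false, Nat.add_zero] at h2 ⊢
            exact hget m' h1 h2
    · -- unique name: count = 1, hence no earlier occurrence
      have h1 : all.count m = 1 := by omega
      have hpre0 : pre.count m = 0 := by
        have : all.count m = pre.count m + (m :: rest).count m := by rw [hall, List.count_append]
        simp at this
        omega
      have hA : convert2PS_stepA all (tA, acc) m = (tA, acc ++ [m]) := by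
        simp [convert2PS_stepA, hrep]
      rw [hA, ih (pre ++ [m]) _ _ hall' ?_ ?_]
      · rw [hspec, if_pos hpre0, hlen]
        simp
      · intro m'
        rw [hcon m', hcnt' m']
        by_cases h : m = m'
        · subst h; simp; omega
        · simp [h]
      · intro m' hr1 hr2
        rw [hcnt'] at hr2 ⊢
        by_cases h : m = m'
        · subst h; omega
        · simp only [h, if_false, Nat.add_zero] at hr2 ⊢
          exact hget m' hr1 hr2

theorem convert2PS_eq_spec (xs : List String) : convert2PS xs = specFill xs := by
  unfold convert2PS specFill
  rw [convert2PS_loopA xs xs [] PySem.Dict.empty [] rfl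
    (by intro m; simp [PySem.Dict.contains_empty])
    (by intro m h1 h2; simp at h2)]
  simp [List.range_eq_range']

-- B side: the position-group list of a name, as built by the positions dict
def idxList (xs : List String) (m : String) : List Int :=
  ((PySem.List.enumerate xs).filter (fun p => p.2 == m)).map (·.1)

theorem idxList_append (xs : List String) (y : String) (m : String) :
    idxList (xs ++ [y]) m = idxList xs m ++ if y = m then [(xs.length : Int)] else [] := by
  unfold idxList
  rw [PySem.List.enumerate_append, List.filter_append, List.map_append]
  congr 1
  by_cases h : y = m <;> simp [PySem.List.enumerate, h]

theorem idxList_length (xs : List String) (m : String) :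
    (idxList xs m).length = xs.count m := by
  induction xs using List.reverseRecOn with
  | nil => simp [idxList]
  | append_singleton xs y ih =>
    rw [idxList_append, List.count_append, List.length_append, ih]
    by_cases h : y = m <;> simp [h]

theorem idxList_rank (xs : List String) (m : String) :
    ∀ k, k < (idxList xs m).length →
      ∃ j : Nat, (idxList xs m)[k]? = some (j : Int) ∧ j < xs.length ∧ xs.getD j "" = m ∧
        (xs.take j).count m = k := by
  induction xs using List.reverseRecOn with
  | nil => simp [idxList]
  | append_singleton xs y ih =>
    intro k hk
    rw [idxList_append] at hk ⊢
    by_cases hkl : k < (idxList xs m).length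
    · obtain ⟨j, h1, h2, h3, h4⟩ := ih k hkl
      refine ⟨j, ?_, ?_, ?_, ?_⟩
      · rw [List.getElem?_append_left hkl]; exact h1
      · simp; omega
      · rw [List.getD_eq_getElem _ _ (by simp; omega), List.getElem_append_left h2,
          ← List.getD_eq_getElem _ "" h2]; exact h3
      · rw [List.take_append_of_le_length (by omega)]; exact h4
    · have hy : y = m := by
        by_contra h; simp [h] at hk; omega
      subst hy
      simp at hk
      have hkeq : k = (idxList xs y).length := by omega
      subst hkeq
      refine ⟨xs.length, ?_, by simp, ?_, ?_⟩
      · rw [List.getElem?_append_right (Nat.le_refl _)]; simp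
      · rw [List.getD_eq_getElem _ _ (by simp), List.getElem_append_right (Nat.le_refl _)]
        simp
      · rw [List.take_left, idxList_length]

theorem idxList_mem (xs : List String) (m : String) (j : Nat) (hj : j < xs.length)
    (hm : xs.getD j "" = m) : ((j : Nat) : Int) ∈ idxList xs m := by
  unfold idxList
  refine List.mem_map.mpr ⟨((j : Int), m), ?_, rfl⟩
  refine List.mem_filter.mpr ⟨?_, by simp⟩
  rw [PySem.List.mem_enumerate_iff]
  exact ⟨j, hj, by rw [← hm, List.getD_eq_getElem _ "" hj]; simp⟩

theorem idxList_rank_inv (xs : List String) (m : String) (j : Nat) (hj : j < xs.length)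
    (hm : xs.getD j "" = m) :
    ∃ k, k < (idxList xs m).length ∧ (idxList xs m)[k]? = some ((j : Nat) : Int) ∧
      (xs.take j).count m = k := by
  obtain ⟨k, hk, hget⟩ := List.mem_iff_getElem.mp (idxList_mem xs m j hj hm)
  obtain ⟨j', h1, _, _, h4⟩ := idxList_rank xs m k hk
  have : (j' : Int) = (j : Int) := by
    rw [List.getElem?_eq_getElem hk, hget] at h1
    exact (Option.some_injective _ h1).symm
  have hj' : j' = j := by exact_mod_cast this
  subst hj'
  exact ⟨k, hk, by rw [List.getElem?_eq_getElem hk, hget], h4⟩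

-- getElem? through a fold of List.set updates
theorem foldl_set_length (ups : List (Int × Int)) (v : Int → String) :
    ∀ out : List String,
      (ups.foldl (fun o q => o.set q.2.toNat (v q.1)) out).length = out.length := by
  induction ups with
  | nil => intro out; rfl
  | cons u rest ih => intro out; rw [List.foldl_cons, ih]; simp

theorem foldl_set_untouched (ups : List (Int × Int)) (v : Int → String) (j : Nat) :
    ∀ out : List String, (∀ q ∈ ups, q.2.toNat ≠ j) →
      (ups.foldl (fun o q => o.set q.2.toNat (v q.1)) out)[j]? = out[j]? := by
  induction ups with
  | nil => intro out _; rfl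
  | cons u rest ih =>
    intro out h
    rw [List.foldl_cons, ih _ (fun q hq => h q (List.mem_cons_of_mem _ hq)),
      List.getElem?_set_ne (h u (List.mem_cons_self))]

theorem foldl_set_keep (ups : List (Int × Int)) (v : Int → String) (j : Nat) (w : String) :
    ∀ out : List String, j < out.length →
      (∀ q ∈ ups, q.2.toNat = j → v q.1 = w) →
      (out[j]? = some w ∨ ∃ q ∈ ups, q.2.toNat = j) →
      (ups.foldl (fun o q => o.set q.2.toNat (v q.1)) out)[j]? = some w := by
  induction ups with
  | nil =>
    intro out _ _ hd
    rcases hd with h | ⟨q, hq, _⟩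
    · exact h
    · simp at hq
  | cons u rest ih =>
    intro out hj hv hd
    rw [List.foldl_cons]
    by_cases hu : u.2.toNat = j
    · refine ih _ (by simp [hj]) (fun q hq => hv q (List.mem_cons_of_mem _ hq)) (Or.inl ?_)
      rw [hu, List.getElem?_set_self hj, hv u List.mem_cons_self hu]
    · refine ih _ (by simp [hj]) (fun q hq => hv q (List.mem_cons_of_mem _ hq)) ?_
      rcases hd with h | ⟨q, hq, hqj⟩
      · exact Or.inl (by rw [List.getElem?_set_ne hu]; exact h)
      · rcases List.mem_cons.mp hq with rfl | hq'
        · exact absurd hqj hu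
        · exact Or.inr ⟨q, hq', hqj⟩

theorem fill_length (out : List String) (m : String) (idxs : List Int) :
    (convert2PS_fill out m idxs).length = out.length := by
  cases idxs with
  | nil => rfl
  | cons i0 rest =>
    rw [convert2PS_fill]
    exact (foldl_set_length (PySem.List.enumerate rest 1)
      (fun k => m ++ "__ps" ++ PySem.Int.toStr k) (out.set i0.toNat m)).trans (by simp)

theorem fill_getElem? (xs : List String) (m : String) (out : List String)
    (hlen : out.length = xs.length) (hm : m ∈ xs) (j : Nat) (hj : j < xs.length) :
    (convert2PS_fill out m (idxList xs m))[j]? =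
      if xs.getD j "" = m then some (specAt xs j) else out[j]? := by
  obtain ⟨j0, hj0, hxj0⟩ := List.mem_iff_getElem.mp hm
  have hmem0 : ((j0 : Nat) : Int) ∈ idxList xs m :=
    idxList_mem xs m j0 hj0 (by rw [List.getD_eq_getElem _ "" hj0, hxj0])
  cases hI : idxList xs m with
  | nil => rw [hI] at hmem0; simp at hmem0
  | cons i0 rest =>
    have hrank : ∀ k, k < (i0 :: rest).length →
        ∃ jq : Nat, (i0 :: rest)[k]? = some (jq : Int) ∧ jq < xs.length ∧
          xs.getD jq "" = m ∧ (xs.take jq).count m = k := by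
      intro k hk
      have h := idxList_rank xs m k (by rw [hI]; exact hk)
      rw [hI] at h
      exact h
    obtain ⟨ja, ha1, _, ha3, ha4⟩ := hrank 0 (by simp)
    have hi0 : i0 = (ja : Int) := by simpa using ha1
    have hQ : ∀ q ∈ PySem.List.enumerate rest 1, ∃ jq : Nat, q.2 = (jq : Int) ∧
        q.1 = ((xs.take jq).count m : Int) ∧ jq < xs.length ∧ xs.getD jq "" = m ∧
        1 ≤ (xs.take jq).count m := by
      intro q hq
      rw [PySem.List.mem_enumerate_iff] at hq
      obtain ⟨k', hk', rfl⟩ := hq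
      obtain ⟨jq, h1, h2, h3, h4⟩ := hrank (k' + 1) (by simp; omega)
      rw [List.getElem?_cons_succ, List.getElem?_eq_getElem hk'] at h1
      refine ⟨jq, by simpa using h1, ?_, h2, h3, by omega⟩
      simp [h4]; omega
    simp only [convert2PS_fill]
    by_cases hx : xs.getD j "" = m
    · rw [if_pos hx]
      obtain ⟨k, hk', hgk, hck⟩ := idxList_rank_inv xs m j hj hx
      rw [hI] at hk' hgk
      by_cases hc0 : k = 0
      · subst hc0
        have hij : i0 = (j : Int) := by simpa using hgk
        have hx2 : xs[j]?.getD "" = m := hx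
        have hspec : specAt xs j = m := by simp [specAt, hx2, hck]
        rw [hspec]
        refine foldl_set_keep (PySem.List.enumerate rest 1) (fun t => m ++ "__ps" ++ PySem.Int.toStr t) j m (out.set i0.toNat m) ?_ ?_ (Or.inl ?_)
        · simp only [List.length_set]; omega
        · intro q hq hqj
          obtain ⟨jq, hq1, _, _, _, hq5⟩ := hQ q hq
          have hjq : jq = j := by rw [hq1] at hqj; simpa using hqj
          rw [hjq] at hq5
          exact absurd hq5 (by omega)
        · have : i0.toNat = j := by rw [hij]; simp
          rw [this, List.getElem?_set_self (by omega)]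
      · have hkk : k - 1 < rest.length := by simp at hk'; omega
        have hrk : rest[k - 1]? = some ((j : Nat) : Int) := by
          rw [← hgk]
          cases k with
          | zero => exact absurd rfl hc0
          | succ k' => simp
        have hqstar : ((k : Int), ((j : Nat) : Int)) ∈ PySem.List.enumerate rest 1 := by
          rw [PySem.List.mem_enumerate_iff]
          refine ⟨k - 1, hkk, ?_⟩
          rw [List.getElem?_eq_getElem hkk] at hrk
          have : rest[k-1] = ((j : Nat) : Int) := by simpa using hrk
          rw [← this]
          congr 1
          omega
        have hx2 : xs[j]?.getD "" = m := hx
        have hspec : specAt xs j = m ++ "__ps" ++ PySem.Int.toStr (k : Int) := by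
          simp [specAt, hx2, hck, hc0]
        rw [hspec]
        refine foldl_set_keep (PySem.List.enumerate rest 1)
          (fun t => m ++ "__ps" ++ PySem.Int.toStr t) j (m ++ "__ps" ++ PySem.Int.toStr (k : Int))
          (out.set i0.toNat m) ?_ ?_ (Or.inr ⟨_, hqstar, by simp⟩)
        · simp only [List.length_set]; omega
        · intro q hq hqj
          obtain ⟨jq, hq1, hq2, _, _, _⟩ := hQ q hq
          have hjq : jq = j := by rw [hq1] at hqj; simpa using hqj
          rw [hq2, hjq, hck]
    · rw [if_neg hx]
      have hne : ∀ q ∈ PySem.List.enumerate rest 1, q.2.toNat ≠ j := by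
        intro q hq
        obtain ⟨jq, hq1, _, _, hq4, _⟩ := hQ q hq
        rw [hq1]
        simp only [Int.toNat_natCast]
        intro h; rw [h] at hq4; exact hx hq4
      have hne0 : i0.toNat ≠ j := by
        rw [hi0]
        simp only [Int.toNat_natCast]
        intro h; rw [h] at ha3; exact hx ha3
      exact (foldl_set_untouched _ (fun k => m ++ "__ps" ++ PySem.Int.toStr k) j _ hne).trans
        (List.getElem?_set_ne hne0)

theorem fold_fill (xs : List String) :
    ∀ (names : List String) (S : List String) (out : List String),
      out.length = xs.length →
      (∀ m ∈ names, m ∈ xs) →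
      (∀ j, j < xs.length → out[j]? = some (if xs.getD j "" ∈ S then specAt xs j else "")) →
      (names.foldl (fun o mm => convert2PS_fill o mm (idxList xs mm)) out).length = xs.length ∧
      ∀ j, j < xs.length →
        (names.foldl (fun o mm => convert2PS_fill o mm (idxList xs mm)) out)[j]?
          = some (if xs.getD j "" ∈ S ++ names then specAt xs j else "") := by
  intro names
  induction names with
  | nil => intro S out h1 _ h3; simpa using ⟨h1, h3⟩
  | cons mm rest ih =>
    intro S out h1 h2 h3
    rw [List.foldl_cons]
    have hmm : mm ∈ xs := h2 mm List.mem_cons_self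
    have h1' : (convert2PS_fill out mm (idxList xs mm)).length = xs.length := by
      rw [fill_length]; exact h1
    have h3' : ∀ j, j < xs.length →
        (convert2PS_fill out mm (idxList xs mm))[j]?
          = some (if xs.getD j "" ∈ S ++ [mm] then specAt xs j else "") := by
      intro j hj
      rw [fill_getElem? xs mm out h1 hmm j hj, h3 j hj]
      by_cases hx : xs.getD j "" = mm
      · rw [if_pos hx, if_pos (List.mem_append.mpr (Or.inr (List.mem_singleton.mpr hx)))]
      · rw [if_neg hx]
        by_cases hs : xs.getD j "" ∈ S
        · rw [if_pos hs, if_pos (List.mem_append.mpr (Or.inl hs))]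
        · rw [if_neg hs, if_neg (by simp only [List.mem_append, List.mem_singleton]; exact fun hc => hc.elim hs hx)]
    obtain ⟨g1, g2⟩ := ih (S ++ [mm]) _ h1' (fun m hmem => h2 m (List.mem_cons_of_mem _ hmem)) h3'
    refine ⟨g1, fun j hj => ?_⟩
    rw [g2 j hj]
    have hiff : (xs.getD j "" ∈ S ++ [mm] ++ rest) ↔ (xs.getD j "" ∈ S ++ mm :: rest) := by
      simp [List.mem_append]
    by_cases hs : xs.getD j "" ∈ S ++ [mm] ++ rest
    · rw [if_pos hs, if_pos (hiff.mp hs)]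
    · rw [if_neg hs, if_neg (fun hc => hs (hiff.mpr hc))]

-- the positions dict built by B's first pass, characterised
theorem positions_getD (xs : List String) (m : String) :
    ((PySem.List.enumerate xs).foldl (fun d p => d.modify p.2 [] (fun l => l ++ [p.1]))
      (PySem.Dict.empty : PySem.Dict String (List Int))).getD m [] = idxList xs m := by
  have hmapfold :
      (PySem.List.enumerate xs).foldl (fun d p => d.modify p.2 [] (fun l => l ++ [p.1]))
        (PySem.Dict.empty : PySem.Dict String (List Int))
      = ((PySem.List.enumerate xs).map (fun p => (p.2, p.1))).foldl
          (fun d p => d.modify p.1 [] (fun l => l ++ [p.2]))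
          (PySem.Dict.empty : PySem.Dict String (List Int)) := by
    rw [List.foldl_map]
  rw [hmapfold, PySem.Dict.getD_foldl_modify_append]
  rw [PySem.Dict.getD_empty, List.filter_map]
  unfold idxList
  simp [List.map_map, Function.comp_def]

theorem positions_keys (xs : List String) :
    ((PySem.List.enumerate xs).foldl (fun d p => d.modify p.2 [] (fun l => l ++ [p.1]))
      (PySem.Dict.empty : PySem.Dict String (List Int))).keys = PySem.Set.ofList xs := by
  rw [PySem.Dict.keys_foldl_modify_key (PySem.List.enumerate xs) (fun p => p.2) []
    (fun _ p => (fun l => l ++ [p.1])) PySem.Dict.empty]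
  rw [PySem.Dict.keys_empty, PySem.List.map_snd_enumerate, PySem.Set.update_nil_left]

theorem convert2PS_alt_eq_spec (xs : List String) : convert2PS_alt xs = specFill xs := by
  show (((PySem.List.enumerate xs).foldl (fun d p => d.modify p.2 [] (fun l => l ++ [p.1]))
      (PySem.Dict.empty : PySem.Dict String (List Int))).items.foldl
      (fun out p => convert2PS_fill out p.1 p.2) (List.replicate xs.length "")) = specFill xs
  have hnd : ((PySem.List.enumerate xs).foldl (fun d p => d.modify p.2 [] (fun l => l ++ [p.1]))
      (PySem.Dict.empty : PySem.Dict String (List Int))).keys.Nodup := by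
    refine PySem.Dict.nodup_keys_foldl_modify_key (PySem.List.enumerate xs) (fun p => p.2) []
      (fun _ p => (fun l => l ++ [p.1])) PySem.Dict.empty ?_
    rw [PySem.Dict.keys_empty]; exact List.nodup_nil
  rw [PySem.Dict.items_eq_map_keys _ hnd [], positions_keys]
  have hitems : (PySem.Set.ofList xs).map (fun k =>
        (k, ((PySem.List.enumerate xs).foldl (fun d p => d.modify p.2 [] (fun l => l ++ [p.1]))
          (PySem.Dict.empty : PySem.Dict String (List Int))).getD k []))
      = (PySem.Set.ofList xs).map (fun k => (k, idxList xs k)) := by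
    refine List.map_congr_left (fun k _ => ?_)
    rw [positions_getD]
  rw [hitems, List.foldl_map]
  obtain ⟨g1, g2⟩ := fold_fill xs (PySem.Set.ofList xs) [] (List.replicate xs.length "")
    (by simp)
    (fun m hmem => (PySem.Set.mem_ofList xs m).mp hmem)
    (by intro j hj; simp [hj])
  refine List.ext_getElem? (fun j => ?_)
  by_cases hj : j < xs.length
  · rw [g2 j hj]
    have hmem : xs.getD j "" ∈ PySem.Set.ofList xs := by
      rw [PySem.Set.mem_ofList]
      rw [List.getD_eq_getElem _ "" hj]
      exact List.getElem_mem hj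
    rw [if_pos (by simpa using hmem)]
    unfold specFill
    rw [List.getElem?_map, List.getElem?_range hj]
    rfl
  · have e1 := List.getElem?_eq_none (l := (PySem.Set.ofList xs).foldl
      (fun o mm => convert2PS_fill o mm (idxList xs mm)) (List.replicate xs.length ""))
      (i := j) (by rw [g1]; omega)
    have e2 := List.getElem?_eq_none (l := specFill xs) (i := j)
      (by simp only [specFill, List.length_map, List.length_range]; omega)
    rw [e1, e2]

-- ===== VERDICT (by name: the statement is the Claim_ definition above) =====
theorem convert2PS_spec : Claim_equal_convert2PS := by
  intro metNames _
  unfold Spec_convert2PS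
  rw [convert2PS_eq_spec, convert2PS_alt_eq_spec]
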